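-- pv_equiv track=rewrite | github.com/Zzathy/functional-programming | module5/task/task3.py | group_into_intervals
-- ===== SOURCE A (Python) =====
-- def group_into_intervals(data, interval_size):
--     grouped_data = {}
--     for value in data:
--         interval_lower = (value // interval_size) * interval_size
--         interval_upper = interval_lower + interval_size
--         interval = (interval_lower, interval_upper)
--         if interval not in grouped_data:
--             grouped_data[interval] = 0
--         grouped_data[interval] += 1
--     return grouped_data
-- ===== SOURCE B (Python) =====
-- def group_into_intervals(data, interval_size):
--     # Bucket-extraction loop: take the first remaining value's interval,
--     # count its whole bucket in one filter pass, drop that bucket, repeat.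
--     # First-occurrence order of intervals is preserved, so the dict is identical.
--     out = {}
--     remaining = data
--     while remaining:
--         lo = remaining[0] // interval_size * interval_size
--         same = [v for v in remaining if v // interval_size * interval_size == lo]
--         remaining = [v for v in remaining[1:] if v // interval_size * interval_size != lo]
--         out[(lo, lo + interval_size)] = len(same)
--     return out
-- ===== Notes on version B (the rewrite author's own statement) =====
-- stated objective: alternative
-- what changed: Replaces A's single-pass hashed dict accumulation with a bucket-extraction loop: repeatedly take the first remaining value's interval, count and remove its whole bucket with filter passes, and continue on the residue.
import Mathlib
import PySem

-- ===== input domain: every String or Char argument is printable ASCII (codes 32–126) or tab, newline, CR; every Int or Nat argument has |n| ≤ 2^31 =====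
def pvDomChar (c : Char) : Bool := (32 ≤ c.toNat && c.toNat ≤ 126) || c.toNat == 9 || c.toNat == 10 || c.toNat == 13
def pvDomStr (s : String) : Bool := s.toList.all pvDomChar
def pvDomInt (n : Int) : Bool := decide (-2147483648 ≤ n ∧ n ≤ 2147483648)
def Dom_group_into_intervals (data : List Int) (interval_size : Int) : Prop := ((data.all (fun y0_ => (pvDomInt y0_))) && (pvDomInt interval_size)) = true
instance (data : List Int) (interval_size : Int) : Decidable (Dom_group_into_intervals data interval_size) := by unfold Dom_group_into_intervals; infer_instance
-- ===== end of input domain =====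

-- B replaces A's single-pass hashed dict accumulation by a bucket-extraction loop:
-- take the first remaining value's interval, count and remove its whole bucket, repeat
-- on the residue (alternative algorithm; not faster).

-- ===== PORT A =====
-- A's dict accumulation loop: for each value compute the interval key; if absent insert 0; then += 1.
def group_into_intervals (data : List Int) (interval_size : Int) : List (Int × Int × Int) :=
  let d : PySem.Dict (Int × Int) Int :=
    data.foldl (fun d value =>
      let interval_lower := PySem.Int.floordiv value interval_size * interval_size
      let interval_upper := interval_lower + interval_size
      let interval := (interval_lower, interval_upper)
      let d := if d.contains interval then d else d.insert interval 0
      d.insert interval (d.getD interval 0 + 1)) PySem.Dict.empty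
  d.items.map (fun p => (p.1.1, p.1.2, p.2))

-- ===== PORT B =====
-- Source B's while loop as structural recursion on the remaining list; the later-iteration keys are all distinct from (lo, lo+size)
-- (rest excludes the bucket) are all distinct from (lo, lo+size), so the dict appends: ported as cons.
def giiGo (interval_size : Int) (l : List Int) : List (Int × Int × Int) :=
  match l with
  | [] => []
  | v :: tail =>
    let lo := PySem.Int.floordiv v interval_size * interval_size
    let same := (v :: tail).filter (fun w => PySem.Int.floordiv w interval_size * interval_size == lo)
    let rest := tail.filter (fun w => PySem.Int.floordiv w interval_size * interval_size != lo)
    (lo, lo + interval_size, (same.length : Int)) :: giiGo interval_size rest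
termination_by l.length
decreasing_by simpa using Nat.lt_succ_of_le (List.length_filter_le _ _)

def group_into_intervals_alt (data : List Int) (interval_size : Int) : List (Int × Int × Int) :=
  giiGo interval_size data

-- ===== PRECONDITION & SPEC =====
-- A raises ZeroDivisionError exactly when data is nonempty and interval_size = 0; excluded here.
def Pre_group_into_intervals (data : List Int) (interval_size : Int) : Prop := data = [] ∨ interval_size ≠ 0
instance (data : List Int) (interval_size : Int) : Decidable (Pre_group_into_intervals data interval_size) := by unfold Pre_group_into_intervals; infer_instance
def pvWitness_group_into_intervals : List Int × Int := ([0, 3, 7, -2, 3], 5)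
def Spec_group_into_intervals (data : List Int) (interval_size : Int) (out : List (Int × Int × Int)) : Prop := out = group_into_intervals_alt data interval_size
instance (data : List Int) (interval_size : Int) (out : List (Int × Int × Int)) : Decidable (Spec_group_into_intervals data interval_size out) := by unfold Spec_group_into_intervals; infer_instance

-- ===== CLAIM (what is proved, stated in full; the proofs are below) =====
def Claim_equal_group_into_intervals : Prop := ∀ (data : List Int) (interval_size : Int), Dom_group_into_intervals data interval_size → Pre_group_into_intervals data interval_size → Spec_group_into_intervals data interval_size (group_into_intervals data interval_size)

-- ===== LEMMAS AND PROOFS =====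

-- A's loop body (set-default-to-0 then increment) is one counter step.
theorem pv_step_eq (d : PySem.Dict (Int × Int) Int) (k : Int × Int) :
    ((if d.contains k then d else d.insert k 0).insert k
      ((if d.contains k then d else d.insert k 0).getD k 0 + 1))
      = d.insert k (d.getD k 0 + 1) := by
  by_cases h : d.contains k = true
  · simp [h]
  · rw [if_neg h, PySem.Dict.getD_insert_self, PySem.Dict.insert_insert_self,
        PySem.Dict.getD_of_not_contains d 0 (by simp [h])]

-- Folding Set.add over elements all distinct from x commutes with a leading x.
theorem pv_foldl_add_cons {α : Type} [BEq α] [LawfulBEq α] (x : α) :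
    ∀ (zs : List α) (t : List α), (∀ z ∈ zs, z ≠ x) →
      zs.foldl PySem.Set.add (x :: t) = x :: zs.foldl PySem.Set.add t := by
  intro zs
  induction zs with
  | nil => intro t _; rfl
  | cons z zs ih =>
    intro t h
    have hz : z ≠ x := h z (by simp)
    have hstep : PySem.Set.add (x :: t) z = x :: PySem.Set.add t z := by
      simp only [PySem.Set.add, PySem.Set.contains, List.contains_eq_mem, List.mem_cons,
        decide_eq_true_eq, List.cons_append]
      by_cases hc : z ∈ t <;> simp [hc, hz]
    simp only [List.foldl_cons, hstep]
    exact ih _ (fun w hw => h w (by simp [hw]))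

-- Adding elements already present is a no-op, so they may be filtered out.
theorem pv_foldl_add_filter {α : Type} [BEq α] [LawfulBEq α] (x : α) :
    ∀ (zs : List α) (s : List α), x ∈ s →
      (zs.filter (fun y => y != x)).foldl PySem.Set.add s = zs.foldl PySem.Set.add s := by
  intro zs
  induction zs with
  | nil => intro s _; rfl
  | cons z zs ih =>
    intro s hs
    have hmem : x ∈ PySem.Set.add s z := by
      simp only [PySem.Set.add, PySem.Set.contains]
      split <;> simp [hs]
    by_cases hz : z = x
    · subst hz
      have hskip : PySem.Set.add s z = s := by
        simp [PySem.Set.add, PySem.Set.contains, List.contains_eq_mem, hs]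
      simp only [List.filter_cons, bne_self_eq_false, Bool.false_eq_true, if_false,
        List.foldl_cons, hskip]
      exact ih s hs
    · have hb : (z != x) = true := by simp [hz]
      simp only [List.filter_cons, hb, if_true, List.foldl_cons]
      exact ih _ hmem

-- set(x :: ys) = x followed by set(ys without x).
theorem pv_ofList_cons {α : Type} [BEq α] [LawfulBEq α] (x : α) (ys : List α) :
    PySem.Set.ofList (x :: ys) = x :: PySem.Set.ofList (ys.filter (fun y => y != x)) := by
  have h0 : PySem.Set.ofList (x :: ys) = ys.foldl PySem.Set.add [x] := by
    simp [PySem.Set.ofList_eq_foldl, PySem.Set.add, PySem.Set.contains]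
  rw [h0, ← pv_foldl_add_filter x ys [x] (by simp),
      pv_foldl_add_cons x _ [] (fun z hz => by
        have := List.of_mem_filter hz; simpa using this)]
  rfl

-- B's recursion computes the canonical first-occurrence grouping.
theorem giiGo_eq (s : Int) :
    ∀ (n : Nat) (l : List Int), l.length ≤ n →
      giiGo s l = (PySem.Set.ofList (l.map (fun v =>
          (PySem.Int.floordiv v s * s, PySem.Int.floordiv v s * s + s)))).map
        (fun k => (k.1, k.2, ((l.map (fun v =>
          (PySem.Int.floordiv v s * s, PySem.Int.floordiv v s * s + s))).count k : Int))) := by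
  intro n
  induction n with
  | zero =>
    intro l hl
    have : l = [] := List.eq_nil_of_length_eq_zero (Nat.le_zero.mp hl)
    subst this
    simp [giiGo, PySem.Set.ofList_eq_foldl]
  | succ n ih =>
    intro l hl
    match l with
    | [] => simp [giiGo, PySem.Set.ofList_eq_foldl]
    | v :: tail =>
      set key : Int → Int × Int := fun w =>
        (PySem.Int.floordiv w s * s, PySem.Int.floordiv w s * s + s) with hkey
      set lo := PySem.Int.floordiv v s * s with hlo
      -- pair-key (in)equality is first-component (in)equality
      have hkeyiff : ∀ w, key w = key v ↔ PySem.Int.floordiv w s * s = lo := by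
        intro w
        constructor
        · intro h; simpa [hkey, hlo, Prod.ext_iff] using (Prod.ext_iff.mp h).1
        · intro h; simp [hkey, hlo, h]
      set rest := tail.filter (fun w => PySem.Int.floordiv w s * s != lo) with hrest
      have hrl : rest.length ≤ n := by
        have h2 : rest.length ≤ tail.length := by
          rw [hrest]; exact List.length_filter_le _ _
        simp only [List.length_cons] at hl
        omega
      have hmapfilter : rest.map key = (tail.map key).filter (fun k => k != key v) := by
        rw [List.filter_map]
        congr 1
        refine (List.filter_congr (fun w _ => ?_)).symm
        by_cases h : PySem.Int.floordiv w s * s = lo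
        · simp [(hkeyiff w).mpr h, h]
        · have h2 : key w ≠ key v := fun hh => h ((hkeyiff w).mp hh)
          have hb1 : (key w != key v) = true := bne_iff_ne.mpr h2
          have hb2 : (PySem.Int.floordiv w s * s != lo) = true := bne_iff_ne.mpr h
          simp only [Function.comp_def] at hb1 ⊢
          rw [hb1, hb2]
      have hunfold : giiGo s (v :: tail) =
          (lo, lo + s, (((v :: tail).filter
            (fun w => PySem.Int.floordiv w s * s == lo)).length : Int)) :: giiGo s rest := by
        rw [giiGo]
      rw [hunfold, ih rest hrl]
      have hcons : (v :: tail).map key = key v :: tail.map key := rfl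
      rw [hcons, pv_ofList_cons, ← hmapfilter]
      simp only [List.map_cons]
      congr 1
      · -- head entry: key and bucket count
        have hcount : (key v :: tail.map key).count (key v)
            = ((v :: tail).filter (fun w => PySem.Int.floordiv w s * s == lo)).length := by
          have h1 : (key v :: tail.map key).count (key v)
              = (v :: tail).countP (fun w => key w == key v) := by
            simp [List.count, List.countP_map, Function.comp_def]
          rw [h1, ← List.countP_eq_length_filter]
          refine List.countP_congr (fun w _ => ?_)
          constructor
          · intro h; exact decide_eq_true ((hkeyiff w).mp (by simpa using h))
          · intro h; exact beq_iff_eq.mpr ((hkeyiff w).mpr (by simpa using h))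
        rw [← hcount]
      · -- tail entries: counts over the full list agree with counts over rest
        refine List.map_congr_left (fun k hk => ?_)
        have hkne : k ≠ key v := by
          have hmem : k ∈ rest.map key := (PySem.List.mem_dedup _ _).mp hk
          rw [hmapfilter] at hmem
          simpa using List.of_mem_filter hmem
        have hc : ((tail.map key).filter (fun x => x != key v)).count k
            = (key v :: tail.map key).count k := by
          rw [List.count_filter (by exact bne_iff_ne.mpr hkne)]
          simp only [List.count_cons]
          have : (key v == k) = false := beq_eq_false_iff_ne.mpr (fun hh => hkne hh.symm)
          simp [this]
        rw [hmapfilter, hc]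

-- ===== VERDICT (by name: the statement is the Claim_ definition above) =====
theorem group_into_intervals_spec : Claim_equal_group_into_intervals := by
  intro data interval_size _ _
  unfold Spec_group_into_intervals group_into_intervals group_into_intervals_alt
  simp only
  have hfold : data.foldl (fun d value =>
      ((if d.contains (PySem.Int.floordiv value interval_size * interval_size,
            PySem.Int.floordiv value interval_size * interval_size + interval_size)
        then d
        else d.insert (PySem.Int.floordiv value interval_size * interval_size,
            PySem.Int.floordiv value interval_size * interval_size + interval_size) 0).insert
        (PySem.Int.floordiv value interval_size * interval_size,
         PySem.Int.floordiv value interval_size * interval_size + interval_size)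
        ((if d.contains (PySem.Int.floordiv value interval_size * interval_size,
              PySem.Int.floordiv value interval_size * interval_size + interval_size)
          then d
          else d.insert (PySem.Int.floordiv value interval_size * interval_size,
              PySem.Int.floordiv value interval_size * interval_size + interval_size) 0).getD
          (PySem.Int.floordiv value interval_size * interval_size,
           PySem.Int.floordiv value interval_size * interval_size + interval_size) 0 + 1)))
      (PySem.Dict.empty : PySem.Dict (Int × Int) Int)
    = ((data.map (fun v =>
        (PySem.Int.floordiv v interval_size * interval_size,
         PySem.Int.floordiv v interval_size * interval_size + interval_size))).foldl
        (fun (d : PySem.Dict (Int × Int) Int) k => d.insert k (d.getD k 0 + 1)) PySem.Dict.empty) := by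
    rw [List.foldl_map]
    exact PySem.List.foldl_congr_mem data _ _ _ (fun d v _ => pv_step_eq d _)
  rw [hfold, PySem.Dict.foldl_insert_getD_add_one_eq_counter, PySem.Dict.items_counter,
      giiGo_eq interval_size data.length data (le_refl _)]
  simp [List.map_map, Function.comp_def]
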